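-- pv_equiv track=rewrite | github.com/raulandrei00/Polytechnique_L2 | algorithms/td5/L_tiling.py | upper_right_hole
-- ===== SOURCE A (Python) =====
-- def middleL(n, i, j, a, b): # returns the middle of the punctured grid of type (n, i, j, a, b)
--     #
--     x , y = 0,0
--     if a >= i + 2 ** (n-1):
--         x = 1
--     if b >= j + 2 ** (n-1):
--         y = 1
--
--     ret = {(i+2**(n-1)-1 , j+2**(n-1)-1) , (i+2**(n-1)-1 , j+2**(n-1)) , (i+2**(n-1), j+2**(n-1)-1) , (i+2**(n-1), j+2**(n-1))}
--     ret.remove((i+2**(n-1) -1 + x , j+2**(n-1) -1 + y))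
--     return [_ for _ in ret]
--
-- def upper_right_hole(n, i, j, a, b): # returns the coordinates of the hole of the upper right quadrant
--     ret = {(i+2**(n-1)-1 , j+2**(n-1)-1) , (i+2**(n-1)-1 , j+2**(n-1)) , (i+2**(n-1), j+2**(n-1)-1) , (i+2**(n-1), j+2**(n-1))}
--     comp = set(middleL(n, i, j, a, b))
--     dif = [_ for _  in ret.difference(comp)]
--     x,y = dif[0][0] - (i+2**(n-1)-1 ), dif[0][1] - (j+2**(n-1)-1)
--     if (x,y) == (1,1):
--         return a,b
--     else: return i+2**(n-1),j+2**(n-1)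
-- ===== SOURCE B (Python) =====
-- def upper_right_hole(n, i, j, a, b): # returns the coordinates of the hole of the upper right quadrant
--     m = 2 ** (n - 1)
--     if a >= i + m and b >= j + m:
--         return a, b
--     return i + m, j + m
-- ===== Notes on version B (the rewrite author's own statement) =====
-- stated objective: simpler
-- what changed: B replaces A's construction of the 4-element center set, the middleL call and the set-difference used to recover the quadrant offset by two direct comparisons a >= i+m and b >= j+m on m = 2**(n-1) computed once.
-- outside the precondition, e.g. on upper_right_hole(0, 0, 0, -5, -5): A returns (0.5, 0.5), B returns (0.5, 0.5)
import Mathlib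
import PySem

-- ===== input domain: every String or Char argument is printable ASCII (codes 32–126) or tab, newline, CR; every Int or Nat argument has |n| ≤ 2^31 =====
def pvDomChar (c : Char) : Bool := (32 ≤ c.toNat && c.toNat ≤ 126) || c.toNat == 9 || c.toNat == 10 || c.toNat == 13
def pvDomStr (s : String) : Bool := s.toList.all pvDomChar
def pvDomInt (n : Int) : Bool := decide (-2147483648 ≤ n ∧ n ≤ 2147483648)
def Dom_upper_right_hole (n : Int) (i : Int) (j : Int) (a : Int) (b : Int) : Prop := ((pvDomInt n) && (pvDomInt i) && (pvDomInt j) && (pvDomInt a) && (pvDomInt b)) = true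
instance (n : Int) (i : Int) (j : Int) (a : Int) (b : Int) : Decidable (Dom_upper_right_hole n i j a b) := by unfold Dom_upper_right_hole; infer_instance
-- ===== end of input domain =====

-- B replaces A's center-set construction, middleL call and set-difference offset recovery
-- by two direct comparisons on m = 2**(n-1) computed once (objective: simpler).


-- ===== PORT A =====
-- Python 2 ** (n-1) on an int n ≥ 1 is exactly 2 ^ (n-1).toNat here (Pre_ requires 1 ≤ n).
def middleL (n : Int) (i : Int) (j : Int) (a : Int) (b : Int) : List (Int × Int) :=
  let x : Int := if a ≥ i + 2 ^ (n - 1).toNat then 1 else 0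
  let y : Int := if b ≥ j + 2 ^ (n - 1).toNat then 1 else 0
  let ret : PySem.Set (Int × Int) := PySem.Set.ofList
    [(i + 2 ^ (n - 1).toNat - 1, j + 2 ^ (n - 1).toNat - 1),
     (i + 2 ^ (n - 1).toNat - 1, j + 2 ^ (n - 1).toNat),
     (i + 2 ^ (n - 1).toNat, j + 2 ^ (n - 1).toNat - 1),
     (i + 2 ^ (n - 1).toNat, j + 2 ^ (n - 1).toNat)]
  -- set.remove: the removed element is always present (x, y ∈ {0,1}), so getD never fires
  (PySem.Set.remove? ret (i + 2 ^ (n - 1).toNat - 1 + x, j + 2 ^ (n - 1).toNat - 1 + y)).getD ret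

def upper_right_hole (n : Int) (i : Int) (j : Int) (a : Int) (b : Int) : Int × Int :=
  let ret : PySem.Set (Int × Int) := PySem.Set.ofList
    [(i + 2 ^ (n - 1).toNat - 1, j + 2 ^ (n - 1).toNat - 1),
     (i + 2 ^ (n - 1).toNat - 1, j + 2 ^ (n - 1).toNat),
     (i + 2 ^ (n - 1).toNat, j + 2 ^ (n - 1).toNat - 1),
     (i + 2 ^ (n - 1).toNat, j + 2 ^ (n - 1).toNat)]
  let comp : PySem.Set (Int × Int) := PySem.Set.ofList (middleL n i j a b)
  let dif : List (Int × Int) := PySem.Set.diff ret comp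
  -- dif[0]: dif always has exactly one element, so the default never fires
  let d0 : Int × Int := (PySem.List.pyGet? dif 0).getD (0, 0)
  let x : Int := d0.1 - (i + 2 ^ (n - 1).toNat - 1)
  let y : Int := d0.2 - (j + 2 ^ (n - 1).toNat - 1)
  if (x, y) = ((1 : Int), (1 : Int)) then (a, b)
  else (i + 2 ^ (n - 1).toNat, j + 2 ^ (n - 1).toNat)

-- ===== PORT B =====
def upper_right_hole_alt (n : Int) (i : Int) (j : Int) (a : Int) (b : Int) : Int × Int :=
  let m : Int := 2 ^ (n - 1).toNat
  if a ≥ i + m ∧ b ≥ j + m then (a, b) else (i + m, j + m)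

-- ===== PRECONDITION & SPEC =====
-- Pre_ excludes n ≤ 0, where Python's 2 ** (n-1) is a float and A returns float coordinates,
-- not values of the declared Int type (B behaves identically there in Python).
def Pre_upper_right_hole (n : Int) (i : Int) (j : Int) (a : Int) (b : Int) : Prop := 1 ≤ n
instance (n : Int) (i : Int) (j : Int) (a : Int) (b : Int) : Decidable (Pre_upper_right_hole n i j a b) := by unfold Pre_upper_right_hole; infer_instance
def pvWitness_upper_right_hole : Int × Int × Int × Int × Int := (3, 0, 0, 5, 6)

def Spec_upper_right_hole (n : Int) (i : Int) (j : Int) (a : Int) (b : Int) (out : Int × Int) : Prop := out = upper_right_hole_alt n i j a b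
instance (n : Int) (i : Int) (j : Int) (a : Int) (b : Int) (out : Int × Int) : Decidable (Spec_upper_right_hole n i j a b out) := by unfold Spec_upper_right_hole; infer_instance

-- ===== CLAIM (what is proved, stated in full; the proofs are below) =====
def Claim_equal_upper_right_hole : Prop := ∀ (n : Int) (i : Int) (j : Int) (a : Int) (b : Int), Dom_upper_right_hole n i j a b → Pre_upper_right_hole n i j a b → Spec_upper_right_hole n i j a b (upper_right_hole n i j a b)

-- ===== LEMMAS AND PROOFS =====

-- A's whole pipeline, with the power abstracted as P ≥ 1, equals B's two-comparison form.
theorem pipeline_eq (P i j a b : Int) :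
    (let x : Int := if a ≥ i + P then 1 else 0
     let y : Int := if b ≥ j + P then 1 else 0
     let ret : PySem.Set (Int × Int) := PySem.Set.ofList
       [(i + P - 1, j + P - 1), (i + P - 1, j + P), (i + P, j + P - 1), (i + P, j + P)]
     let ml : List (Int × Int) :=
       (PySem.Set.remove? ret (i + P - 1 + x, j + P - 1 + y)).getD ret
     let comp : PySem.Set (Int × Int) := PySem.Set.ofList ml
     let dif : List (Int × Int) := PySem.Set.diff ret comp
     let d0 : Int × Int := (PySem.List.pyGet? dif 0).getD (0, 0)
     let x' : Int := d0.1 - (i + P - 1)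
     let y' : Int := d0.2 - (j + P - 1)
     if (x', y') = ((1 : Int), (1 : Int)) then (a, b) else (i + P, j + P)) =
    (if a ≥ i + P ∧ b ≥ j + P then (a, b) else (i + P, j + P)) := by
  have h1 : ¬ (i + P - 1 = i + P) := by omega
  have h2 : ¬ (j + P - 1 = j + P) := by omega
  have h1' : ¬ (i + P = i + P - 1) := by omega
  have h2' : ¬ (j + P = j + P - 1) := by omega
  by_cases ha : a ≥ i + P <;> by_cases hb : b ≥ j + P <;>
    simp [ha, hb, PySem.Set.ofList, PySem.Set.add, PySem.Set.contains, PySem.Set.remove?,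
      PySem.Set.discard, PySem.Set.diff, List.contains_eq_mem, PySem.List.pyGet?,
      PySem.List.pyIdx?, h1, h2, h1', h2', Prod.ext_iff]

theorem upper_right_hole_eq_pipeline (n i j a b : Int) :
    upper_right_hole n i j a b =
    (let P : Int := 2 ^ (n - 1).toNat
     let x : Int := if a ≥ i + P then 1 else 0
     let y : Int := if b ≥ j + P then 1 else 0
     let ret : PySem.Set (Int × Int) := PySem.Set.ofList
       [(i + P - 1, j + P - 1), (i + P - 1, j + P), (i + P, j + P - 1), (i + P, j + P)]
     let ml : List (Int × Int) :=
       (PySem.Set.remove? ret (i + P - 1 + x, j + P - 1 + y)).getD ret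
     let comp : PySem.Set (Int × Int) := PySem.Set.ofList ml
     let dif : List (Int × Int) := PySem.Set.diff ret comp
     let d0 : Int × Int := (PySem.List.pyGet? dif 0).getD (0, 0)
     let x' : Int := d0.1 - (i + P - 1)
     let y' : Int := d0.2 - (j + P - 1)
     if (x', y') = ((1 : Int), (1 : Int)) then (a, b) else (i + P, j + P)) := by
  rfl

-- ===== VERDICT (by name: the statement is the Claim_ definition above) =====
theorem upper_right_hole_spec : Claim_equal_upper_right_hole := by
  intro n i j a b _hdom _hpre
  unfold Spec_upper_right_hole upper_right_hole_alt
  rw [upper_right_hole_eq_pipeline]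
  exact pipeline_eq (2 ^ (n - 1).toNat) i j a b
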